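-- pv_equiv track=rewrite | github.com/eunchaeee/coding-test | 프로그래머스/unrated/181932. 코드 처리하기/코드 처리하기.py | solution
-- ===== SOURCE A (Python) =====
-- def solution(code):
--     answer = ''
--     mode = 0
--     for i in range(len(code)):
--         if code[i] == "1":
--             mode = 1 - mode
--         elif i % 2 == mode:
--             answer += code[i]
--     return "EMPTY" if answer == "" else answer
-- ===== SOURCE B (Python) =====
-- def solution(code):
--     pieces = []
--     pos = 0
--     for k, seg in enumerate(code.split('1')):
--         pieces.append(seg[(k + pos) % 2::2])
--         pos += len(seg) + 1
--     res = ''.join(pieces)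
--     return res if res else 'EMPTY'
-- ===== Notes on version B (the rewrite author's own statement) =====
-- stated objective: faster
-- what changed: B splits the code string at each toggle digit and emits one stride-2 slice seg[(k+pos)%2::2] per segment (the segment index k gives the mode, pos its absolute start), replacing A's character-by-character loop with a toggled mode bit.
import Mathlib
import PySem

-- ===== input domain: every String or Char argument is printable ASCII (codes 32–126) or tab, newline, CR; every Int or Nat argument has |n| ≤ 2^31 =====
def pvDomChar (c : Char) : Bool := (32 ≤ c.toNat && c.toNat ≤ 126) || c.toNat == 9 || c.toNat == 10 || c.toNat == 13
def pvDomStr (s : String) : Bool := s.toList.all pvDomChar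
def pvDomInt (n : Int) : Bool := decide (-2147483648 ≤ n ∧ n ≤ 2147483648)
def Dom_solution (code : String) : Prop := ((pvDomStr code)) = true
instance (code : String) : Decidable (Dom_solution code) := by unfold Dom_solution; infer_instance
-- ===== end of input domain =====

-- ===== PORT A =====
-- One honest line: B splits the code at each toggle digit and emits one stride-2 slice per
-- segment instead of A's char-by-char loop with a toggled mode bit; measured faster (bulk slicing).

-- A's loop: index i, accumulated answer (as chars), and the toggle mode.
def solutionGo : List Char → Int → List Char → Int → List Char
  | [], _, ans, _ => ans
  | c :: t, i, ans, m =>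
    if c = '1' then solutionGo t (i + 1) ans (1 - m)
    else if PySem.Int.mod i 2 = m then solutionGo t (i + 1) (ans ++ [c]) m
    else solutionGo t (i + 1) ans m

def solution (code : String) : String :=
  let a := solutionGo code.toList 0 [] 0
  if a = [] then "EMPTY" else String.ofList a

-- ===== PORT B =====
-- Source B: for k, seg in enumerate(code.split('1')): pieces.append(seg[(k+pos)%2::2]); pos += len(seg)+1
def solution_alt (code : String) : String :=
  let segs := PySem.Chars.splitOn code.toList ['1']
  let st := (PySem.List.enumerate segs 0).foldl
      (fun (st : List (List Char) × Int) kseg =>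
        (st.1 ++ [(PySem.List.slice? kseg.2 (some (PySem.Int.mod (kseg.1 + st.2) 2)) none 2).getD []],
         st.2 + (kseg.2.length : Int) + 1))
      ([], 0)
  let res := st.1.flatten
  if res = [] then "EMPTY" else String.ofList res

-- ===== PRECONDITION & SPEC =====
def Spec_solution (code : String) (out : String) : Prop := out = solution_alt code
instance (code : String) (out : String) : Decidable (Spec_solution code out) := by unfold Spec_solution; infer_instance

-- ===== CLAIM (what is proved, stated in full; the proofs are below) =====
def Claim_equal_solution : Prop := ∀ (code : String), Dom_solution code → Spec_solution code (solution code)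

-- ===== LEMMAS AND PROOFS =====

-- recursive characterization of code.split('1'): (head segment, remaining segments)
def spFn : List Char → List Char × List (List Char)
  | [] => ([], [])
  | c :: t =>
    let p := spFn t
    if c = '1' then ([], p.1 :: p.2) else (c :: p.1, p.2)

theorem splitOn_go_eq : ∀ (fuel : Nat) (l cur : List Char) (acc : List (List Char)),
    l.length ≤ fuel →
    PySem.Chars.splitOn.go ['1'] fuel l cur acc
      = acc.reverse ++ (cur.reverse ++ (spFn l).1) :: (spFn l).2 := by
  intro fuel
  induction fuel with
  | zero =>
    intro l cur acc h
    have : l = [] := by cases l <;> simp_all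
    subst this
    simp [PySem.Chars.splitOn.go, spFn]
  | succ n ih =>
    intro l cur acc h
    cases l with
    | nil => simp [PySem.Chars.splitOn.go, spFn]
    | cons c t =>
      by_cases hc : c = '1'
      · subst hc
        have hpre : List.isPrefixOf ['1'] ('1' :: t) = true := by simp [List.isPrefixOf]
        rw [PySem.Chars.splitOn.go]
        simp only [hpre, if_true]
        rw [show List.drop (List.length ['1']) ('1' :: t) = t from rfl]
        rw [ih t [] (cur.reverse :: acc) (by simp at h; omega)]
        simp [spFn]
      · have hpre : List.isPrefixOf ['1'] (c :: t) = false := by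
          simp only [List.isPrefixOf, Bool.and_true, beq_eq_false_iff_ne,
            ne_eq]
          exact fun h => hc h.symm
        rw [PySem.Chars.splitOn.go]
        simp only [hpre, Bool.false_eq_true, if_false]
        rw [ih t (c :: cur) acc (by simp at h; omega)]
        simp [spFn, hc]

theorem splitOn_eq (s : List Char) :
    PySem.Chars.splitOn s ['1'] = (spFn s).1 :: (spFn s).2 := by
  unfold PySem.Chars.splitOn
  rw [splitOn_go_eq (s.length + 1) s [] [] (by omega)]
  simp

-- every-other-character of a list (stride-2 selection from position 0)
def eo : List Char → List Char
  | [] => []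
  | [c] => [c]
  | c :: _ :: t => c :: eo t

theorem eo_filterMap : ∀ (l : List Char),
    (List.range ((l.length + 1) / 2)).filterMap (fun k => l[2 * k]?) = eo l := by
  intro l
  induction l using eo.induct with
  | case1 => simp [eo]
  | case2 c => simp [eo]
  | case3 c d t ih =>
    have hcount : (((c :: d :: t).length + 1) / 2) = (t.length + 1) / 2 + 1 := by
      simp; omega
    rw [hcount, List.range_succ_eq_map]
    simp only [List.filterMap_cons]
    simp only [List.filterMap_map]
    have : ∀ k : Nat, (c :: d :: t)[2 * Nat.succ k]? = t[2 * k]? := by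
      intro k
      have : 2 * Nat.succ k = 2 * k + 1 + 1 := by omega
      rw [this]
      simp
    simp only [Function.comp_def, this]
    simp [eo, ih]

theorem slice2 (l : List Char) (j : Int) (h0 : 0 ≤ j) (h1 : j ≤ 1) :
    (PySem.List.slice? l (some j) none 2).getD [] = eo (l.drop j.toNat) := by
  unfold PySem.List.slice? PySem.List.sliceIndices
  rw [if_neg (by omega : ¬ (2:Int) = 0)]
  simp only [show ¬((2:Int) < 0) from by omega, if_false, if_neg (by omega : ¬ j < 0),
    Option.getD_some]
  set n := l.length with hn
  set s : Int := min j (n : Int) with hs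
  have hs0 : 0 ≤ s := le_min h0 (by positivity)
  have hsle : s ≤ (n : Int) := min_le_right _ _
  have hdropj : l.drop j.toNat = l.drop s.toNat := by
    rcases le_or_gt j (n : Int) with h | h
    · have hsj : s = j := by rw [hs]; exact min_eq_left h
      rw [hsj]
    · have hsn : s = (n : Int) := by rw [hs]; exact min_eq_right h.le
      rw [hsn, List.drop_eq_nil_of_le (by omega), List.drop_eq_nil_of_le (by omega)]
  rw [hdropj]
  have hcount : (if s < (n : Int) then (((n : Int) - s + 2 - 1) / 2).toNat else 0)
      = ((l.drop s.toNat).length + 1) / 2 := by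
    rcases lt_or_ge s (n : Int) with h | h
    · rw [if_pos h]
      simp only [List.length_drop, ← hn]
      omega
    · rw [if_neg (by omega : ¬ s < (n : Int))]
      simp only [List.length_drop, ← hn]
      omega
  have hget : ∀ k : Nat, l[(s + 2 * (k : Int)).toNat]? = (l.drop s.toNat)[2 * k]? := by
    intro k
    rw [List.getElem?_drop]
    congr 1
    omega
  rw [hcount]
  rw [show (fun k : Nat => l[(s + 2 * (k : Int)).toNat]?)
        = (fun k : Nat => (l.drop s.toNat)[2 * k]?) from funext hget]
  exact eo_filterMap _

-- B's per-segment loop, with explicit index k and absolute start position pos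
def bGo : List (List Char) → Int → Int → List (List Char)
  | [], _, _ => []
  | seg :: rest, k, pos =>
      (PySem.List.slice? seg (some ((k + pos) % 2)) none 2).getD []
        :: bGo rest (k + 1) (pos + (seg.length : Int) + 1)

theorem bGo_parity : ∀ (segs : List (List Char)) (k k' pos : Int),
    k % 2 = k' % 2 → bGo segs k pos = bGo segs k' pos := by
  intro segs
  induction segs with
  | nil => intro k k' pos _; rfl
  | cons seg rest ih =>
    intro k k' pos h
    simp only [bGo]
    rw [show (k + pos) % 2 = (k' + pos) % 2 from by omega,
      ih (k + 1) (k' + 1) _ (by omega)]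

theorem foldB : ∀ (segs : List (List Char)) (k pos : Int) (pieces : List (List Char)),
    ((PySem.List.enumerate segs k).foldl
      (fun (st : List (List Char) × Int) kseg =>
        (st.1 ++ [(PySem.List.slice? kseg.2 (some (PySem.Int.mod (kseg.1 + st.2) 2)) none 2).getD []],
         st.2 + (kseg.2.length : Int) + 1))
      (pieces, pos)).1 = pieces ++ bGo segs k pos := by
  intro segs
  induction segs with
  | nil => intro k pos pieces; simp [PySem.List.enumerate_nil, bGo]
  | cons seg rest ih =>
    intro k pos pieces
    rw [PySem.List.enumerate_cons]
    simp only [List.foldl_cons]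
    rw [ih]
    simp [bGo]

theorem solutionGo_append : ∀ (t : List Char) (i m : Int) (ans : List Char),
    solutionGo t i ans m = ans ++ solutionGo t i [] m := by
  intro t
  induction t with
  | nil => intro i m ans; simp [solutionGo]
  | cons c t ih =>
    intro i m ans
    by_cases hc : c = '1'
    · simp only [solutionGo]
      rw [if_pos hc, if_pos hc]
      exact ih _ _ ans
    · by_cases hm : PySem.Int.mod i 2 = m
      · simp only [solutionGo]
        rw [if_neg hc, if_neg hc, if_pos hm, if_pos hm, List.nil_append]
        rw [ih _ _ (ans ++ [c]), ih _ _ [c], List.append_assoc]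
      · simp only [solutionGo]
        rw [if_neg hc, if_neg hc, if_neg hm, if_neg hm]
        exact ih _ _ ans

theorem eo_cons_drop (c : Char) (h : List Char) : eo (c :: h) = c :: eo (h.drop 1) := by
  cases h <;> simp [eo]

theorem main_eq : ∀ (t : List Char) (i m : Int), 0 ≤ i → (m = 0 ∨ m = 1) →
    solutionGo t i [] m = (bGo ((spFn t).1 :: (spFn t).2) m i).flatten := by
  intro t
  induction t with
  | nil =>
    intro i m _ hm
    have hj0 : 0 ≤ (m + i) % 2 := Int.emod_nonneg _ (by omega)
    have hj1 : (m + i) % 2 ≤ 1 := by omega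
    simp [solutionGo, spFn, bGo, slice2 _ _ hj0 hj1, eo]
  | cons c t ih =>
    intro i m hi hm
    have hmod : PySem.Int.mod i 2 = i % 2 :=
      PySem.Int.mod_eq_emod_of_pos (by omega)
    have hj0 : 0 ≤ (m + i) % 2 := Int.emod_nonneg _ (by omega)
    have hj1 : (m + i) % 2 ≤ 1 := by omega
    by_cases hc : c = '1'
    · -- toggle: first segment of spFn (c::t) is empty, the rest shift
      simp only [solutionGo, hc, if_true]
      rw [ih (i + 1) (1 - m) (by omega) (by omega)]
      simp only [spFn, if_true, bGo, List.flatten_cons]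
      rw [slice2 _ _ hj0 hj1]
      simp only [List.drop_nil, eo, List.nil_append, List.length_nil, Nat.cast_zero, add_zero]
      rw [show (1 - m + (i + 1)) % 2 = (m + 1 + (i + 1)) % 2 from by omega,
        bGo_parity (spFn t).2 (1 - m + 1) (m + 1 + 1) _ (by omega)]
    · -- ordinary char: it heads the first segment
      have hsp : spFn (c :: t) = (c :: (spFn t).1, (spFn t).2) := by
        simp [spFn, hc]
      rw [hsp]
      have hj0' : 0 ≤ (m + (i + 1)) % 2 := Int.emod_nonneg _ (by omega)
      have hj1' : (m + (i + 1)) % 2 ≤ 1 := by omega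
      by_cases hpar : i % 2 = m
      · -- kept: j = 0
        have hj : (m + i) % 2 = 0 := by omega
        have hj' : (m + (i + 1)) % 2 = 1 := by omega
        simp only [solutionGo, hc, if_false, hmod, hpar, if_true]
        rw [solutionGo_append, ih (i + 1) m (by omega) hm]
        simp only [bGo, List.flatten_cons]
        rw [slice2 _ _ hj0 hj1, slice2 _ _ hj0' hj1', hj, hj']
        simp only [Int.toNat_zero, Int.toNat_one, List.drop_zero]
        rw [eo_cons_drop]
        rw [show i + ((List.length (c :: (spFn t).1)) : Int) + 1
              = i + 1 + (((spFn t).1.length) : Int) + 1 by simp; omega]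
        simp
      · -- dropped: j = 1
        have hj : (m + i) % 2 = 1 := by omega
        have hj' : (m + (i + 1)) % 2 = 0 := by omega
        simp only [solutionGo, hc, if_false, hmod, hpar]
        rw [ih (i + 1) m (by omega) hm]
        simp only [bGo, List.flatten_cons]
        rw [slice2 _ _ hj0 hj1, slice2 _ _ hj0' hj1', hj, hj']
        simp only [Int.toNat_zero, Int.toNat_one, List.drop_zero, List.drop_one, List.tail_cons]
        rw [show i + ((List.length (c :: (spFn t).1)) : Int) + 1
              = i + 1 + (((spFn t).1.length) : Int) + 1 by simp; omega]

-- ===== VERDICT (by name: the statement is the Claim_ definition above) =====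
theorem solution_spec : Claim_equal_solution := by
  intro code _
  unfold Spec_solution solution solution_alt
  dsimp only
  rw [splitOn_eq, foldB, List.nil_append,
    main_eq code.toList 0 0 (by omega) (Or.inl rfl)]
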